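-- pv_equiv track=rewrite | github.com/Volaxar/checkio | power-supply.py | power_supply
-- ===== SOURCE A (Python) =====
-- class Node:
--     __nodes = {}
--
--     def __init__(self, name):
--         self.name = name
--         self.links = []
--
--     @staticmethod
--     def get_node(name):
--         if name in Node.__nodes:
--             node = Node.__nodes[name]
--
--         else:
--             node = Node(name)
--             Node.__nodes[name] = node
--
--         return node
--
--     @staticmethod
--     def clear():
--         Node.__nodes = {}
--
-- def build_route(city, enabled, power):
--     if power == 0:
--         return
--
--     for link in city.links:
--         if link.name in enabled and enabled[link.name] >= power:
--             continue
--
--         enabled[link.name] = power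
--
--         build_route(link, enabled, power - 1)
--
-- def power_supply(network, power_plants):
--     Node.clear()
--
--     for link in network:
--         for i, l in enumerate(link):
--             if link[1 - i] not in power_plants:
--                 Node.get_node(l).links.append(Node.get_node(link[1 - i]))
--
--     enabled = {}
--
--     for plant, power in power_plants.items():
--         build_route(Node.get_node(plant), enabled, power)
--
--     return set([node for link in network for node in link if node not in power_plants]).difference(enabled.keys())
-- ===== SOURCE B (Python) =====
-- def power_supply(network, power_plants):
--     # Adjacency map built in one direct pass (no Node objects / global registry);
--     # edges never point into a plant, exactly as in the original grid.
--     adj = {}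
--     for a, b in network:
--         if b not in power_plants:
--             adj.setdefault(a, []).append(b)
--         if a not in power_plants:
--             adj.setdefault(b, []).append(a)
--
--     # Power propagation with an explicit stack instead of recursion.
--     # A frame (v, p) means: visit node v arriving with power p; power drops by
--     # one per hop and propagation stops only when it is exactly zero.
--     enabled = {}
--     for plant, power in power_plants.items():
--         if power == 0:
--             continue
--         stack = [(x, power) for x in reversed(adj.get(plant, []))]
--         while stack:
--             v, p = stack.pop()
--             if v in enabled and enabled[v] >= p:
--                 continue
--             enabled[v] = p
--             if p != 1:
--                 stack.extend((x, p - 1) for x in reversed(adj.get(v, [])))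
--
--     return {x for a, b in network for x in (a, b)
--             if x not in power_plants and x not in enabled}
-- ===== Notes on version B (the rewrite author's own statement) =====
-- stated objective: alternative
-- what changed: B drops A's global Node-object registry and per-plant recursive DFS: it builds a plain adjacency dict in one direct pass and propagates power with an explicit stack of (node, power) frames (plus a direct filtered set comprehension for the result), keeping A's exact propagation semantics (power drops by 1 per hop and stops only at exactly 0, so nonzero negative powers flood) and therefore its exact marking order.
import Mathlib
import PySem

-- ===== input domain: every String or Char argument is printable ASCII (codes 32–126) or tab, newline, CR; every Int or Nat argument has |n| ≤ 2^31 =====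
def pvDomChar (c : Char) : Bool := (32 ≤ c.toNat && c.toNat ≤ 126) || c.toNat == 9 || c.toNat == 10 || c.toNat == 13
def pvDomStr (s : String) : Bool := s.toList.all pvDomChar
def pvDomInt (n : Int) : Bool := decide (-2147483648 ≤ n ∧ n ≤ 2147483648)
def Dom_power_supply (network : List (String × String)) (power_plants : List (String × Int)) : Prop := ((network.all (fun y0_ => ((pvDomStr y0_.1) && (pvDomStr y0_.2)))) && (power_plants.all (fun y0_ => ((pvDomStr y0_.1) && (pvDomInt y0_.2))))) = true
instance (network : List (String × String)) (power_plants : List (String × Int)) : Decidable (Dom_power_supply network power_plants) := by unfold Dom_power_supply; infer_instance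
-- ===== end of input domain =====

-- B replaces A's global Node registry and per-plant recursive DFS by a plain adjacency
-- dict and an explicit-stack traversal performing the same marking steps in the same
-- order (A's propagation semantics — power drops by 1 per hop and stops only at exactly
-- 0 — is kept exactly, including nonzero negative powers); objective: alternative.

-- ===== PORT A =====
-- body of `if link[1 - i] not in power_plants: Node.get_node(l).links.append(Node.get_node(link[1-i]))`
-- (Node identity = its name; Node.__nodes becomes a dict name ↦ links-name-list;
--  get_node = setdefault with [], links.append = modify with default [])
def psAddEdge (plants : PySem.Dict String Int) (nodes : PySem.Dict String (List String))
    (l other : String) : PySem.Dict String (List String) :=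
  if plants.contains other then nodes
  else ((nodes.setdefault l []).setdefault other []).modify l [] (fun ls => ls ++ [other])

-- build_route, fuel-guarded (the Nat fuel only makes the recursion structural; it is
-- never exhausted: a chain of strictly increasing marks visits distinct nodes)
def psBuildRoute (adj : PySem.Dict String (List String)) :
    Nat → String → PySem.Dict String Int → Int → PySem.Dict String Int
  | 0, _, enabled, _ => enabled
  | f + 1, city, enabled, power =>
    if power = 0 then enabled
    else
      (adj.getD city []).foldl
        (fun enabled link =>
          if enabled.contains link && decide (enabled.getD link 0 ≥ power) then enabled
          else psBuildRoute adj f link (enabled.insert link power) (power - 1))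
        enabled

def power_supply (network : List (String × String)) (power_plants : List (String × Int)) : List String :=
  let plants := PySem.Dict.ofList power_plants
  -- for link in network: for i, l in enumerate(link): … (2-tuple loop unrolled: i = 0 then i = 1)
  let nodes : PySem.Dict String (List String) :=
    network.foldl
      (fun nodes link => psAddEdge plants (psAddEdge plants nodes link.1 link.2) link.2 link.1)
      PySem.Dict.empty
  -- for plant, power in power_plants.items(): build_route(Node.get_node(plant), enabled, power)
  let st :=
    plants.items.foldl
      (fun (st : PySem.Dict String (List String) × PySem.Dict String Int) pp =>
        let nodes' := st.1.setdefault pp.1 []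
        (nodes', psBuildRoute nodes' (2 * network.length + 2) pp.1 st.2 pp.2))
      (nodes, PySem.Dict.empty)
  PySem.Set.diff
    (PySem.Set.ofList
      ((network.flatMap (fun link => [link.1, link.2])).filter (fun node => !plants.contains node)))
    st.2.keys

-- ===== PORT B =====
-- `adj.setdefault(a, []).append(b)` (mutating the shared list) = modify a [] (· ++ [b])
def psbAddEdge (plants : PySem.Dict String Int) (adj : PySem.Dict String (List String))
    (a b : String) : PySem.Dict String (List String) :=
  if plants.contains b then adj else adj.modify a [] (fun ls => ls ++ [b])

-- longest adjacency list (used only to bound the termination measure of psRunStack)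
def psAdjCap (adj : PySem.Dict String (List String)) : Nat :=
  adj.values.foldl (fun acc v => Nat.max acc v.length) 0

theorem psLen_getD_le_cap (adj : PySem.Dict String (List String)) (k : String) :
    (adj.getD k []).length ≤ psAdjCap adj := by
  cases h : adj.get? k with
  | none => simp [PySem.Dict.getD, h]
  | some v =>
    have hv : v ∈ adj.values := by
      have := PySem.Dict.mem_items_of_get?_eq_some (d := adj) h
      simp only [PySem.Dict.values]
      exact List.mem_map.mpr ⟨(k, v), this, rfl⟩
    have := (PySem.List.le_foldl_max_nat adj.values List.length 0).2 v hv
    simpa [PySem.Dict.getD, h, psAdjCap] using this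

-- termination-measure facts for psRunStack (named so the embedded proofs stay small)
theorem psDecTail (adj : PySem.Dict String (List String)) (fr : String × Nat × Int)
    (stack : List (String × Nat × Int)) :
    (stack.map (fun fr => (psAdjCap adj + 1) ^ fr.2.1)).sum
      < ((fr :: stack).map (fun fr => (psAdjCap adj + 1) ^ fr.2.1)).sum := by
  simp only [List.map_cons, List.sum_cons]
  exact Nat.lt_add_of_pos_left (Nat.pow_pos (by omega))

theorem psDecPush (adj : PySem.Dict String (List String)) (v : String) (f' : Nat) (p q : Int)
    (stack : List (String × Nat × Int)) :
    ((((adj.getD v []).map (fun x => (x, f', q))) ++ stack).map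
        (fun fr => (psAdjCap adj + 1) ^ fr.2.1)).sum
      < (((v, f' + 1, p) :: stack).map (fun fr => (psAdjCap adj + 1) ^ fr.2.1)).sum := by
  simp only [List.map_cons, List.sum_cons, List.map_append, List.sum_append, List.map_map,
    Nat.succ_eq_add_one]
  have hcomp : ((fun fr : String × Nat × Int => (psAdjCap adj + 1) ^ fr.2.1) ∘
      (fun x => (x, f', q))) = fun _ : String => (psAdjCap adj + 1) ^ f' := rfl
  rw [hcomp]
  have hsum : ((adj.getD v []).map (fun _ : String => (psAdjCap adj + 1) ^ f')).sum
      = (adj.getD v []).length * (psAdjCap adj + 1) ^ f' := by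
    simp [List.map_const', List.sum_replicate, smul_eq_mul]
  rw [hsum]
  have hlen : (adj.getD v []).length ≤ psAdjCap adj := psLen_getD_le_cap adj v
  have h1 : (adj.getD v []).length * (psAdjCap adj + 1) ^ f'
      ≤ psAdjCap adj * (psAdjCap adj + 1) ^ f' := Nat.mul_le_mul_right _ hlen
  have hq : 0 < (psAdjCap adj + 1) ^ f' := Nat.pow_pos (by omega)
  have h2 : (psAdjCap adj + 1) ^ (f' + 1)
      = psAdjCap adj * (psAdjCap adj + 1) ^ f' + (psAdjCap adj + 1) ^ f' := by
    rw [pow_succ]; ring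
  omega

-- the explicit stack: a frame (v, f, p) is "visit node v arriving with power p"
-- (f is the fuel guard; Python's stack top is the list head here, so Python's
--  `extend((x, p-1) for x in reversed(adj.get(v, [])))` prepends the mapped list)
def psRunStack (adj : PySem.Dict String (List String)) :
    List (String × Nat × Int) → PySem.Dict String Int → PySem.Dict String Int
  | [], enabled => enabled
  | (v, f, p) :: stack, enabled =>
    if enabled.contains v && decide (enabled.getD v 0 ≥ p) then
      psRunStack adj stack enabled
    else
      match f with
      | 0 => psRunStack adj stack (enabled.insert v p)
      | f' + 1 =>
        if p = 1 then psRunStack adj stack (enabled.insert v p)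
        else
          psRunStack adj (((adj.getD v []).map (fun x => (x, f', p - 1))) ++ stack)
            (enabled.insert v p)
termination_by stack _ => (stack.map (fun fr => (psAdjCap adj + 1) ^ fr.2.1)).sum
decreasing_by
  · exact psDecTail adj _ stack
  · exact psDecTail adj _ stack
  · exact psDecTail adj _ stack
  · exact psDecPush adj v f' p (p - 1) stack

def power_supply_alt (network : List (String × String)) (power_plants : List (String × Int)) : List String :=
  let plants := PySem.Dict.ofList power_plants
  let adj : PySem.Dict String (List String) :=
    network.foldl
      (fun adj link => psbAddEdge plants (psbAddEdge plants adj link.1 link.2) link.2 link.1)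
      PySem.Dict.empty
  let enabled :=
    plants.items.foldl
      (fun enabled pp =>
        if pp.2 = 0 then enabled
        else psRunStack adj ((adj.getD pp.1 []).map (fun x => (x, 2 * network.length + 1, pp.2))) enabled)
      PySem.Dict.empty
  PySem.Set.ofList
    ((network.flatMap (fun link => [link.1, link.2])).filter
      (fun x => !plants.contains x && !enabled.contains x))

-- ===== PRECONDITION & SPEC =====
def Spec_power_supply (network : List (String × String)) (power_plants : List (String × Int)) (out : List String) : Prop := out = power_supply_alt network power_plants
instance (network : List (String × String)) (power_plants : List (String × Int)) (out : List String) : Decidable (Spec_power_supply network power_plants out) := by unfold Spec_power_supply; infer_instance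

-- ===== CLAIM (what is proved, stated in full; the proofs are below) =====
def Claim_equal_power_supply : Prop := ∀ (network : List (String × String)) (power_plants : List (String × Int)), Dom_power_supply network power_plants → Spec_power_supply network power_plants (power_supply network power_plants)

-- ===== LEMMAS AND PROOFS =====

-- one step of A's inner DFS loop, at child fuel f and current power p
def psStep (adj : PySem.Dict String (List String)) (f : Nat) (p : Int)
    (enabled : PySem.Dict String Int) (link : String) : PySem.Dict String Int :=
  if enabled.contains link && decide (enabled.getD link 0 ≥ p) then enabled
  else psBuildRoute adj f link (enabled.insert link p) (p - 1)

theorem psBuildRoute_succ (adj : PySem.Dict String (List String)) (f : Nat) (c : String)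
    (E : PySem.Dict String Int) (p : Int) :
    psBuildRoute adj (f + 1) c E p
      = if p = 0 then E else (adj.getD c []).foldl (psStep adj f p) E := rfl

theorem psRunStack_nil (adj : PySem.Dict String (List String)) (E : PySem.Dict String Int) :
    psRunStack adj [] E = E := by
  rw [psRunStack.eq_def]

theorem psRunStack_cons (adj : PySem.Dict String (List String)) (v : String) (f : Nat) (p : Int)
    (stack : List (String × Nat × Int)) (E : PySem.Dict String Int) :
    psRunStack adj ((v, f, p) :: stack) E
      = if E.contains v && decide (E.getD v 0 ≥ p) then psRunStack adj stack E
        else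
          match f with
          | 0 => psRunStack adj stack (E.insert v p)
          | f' + 1 =>
            if p = 1 then psRunStack adj stack (E.insert v p)
            else
              psRunStack adj (((adj.getD v []).map (fun x => (x, f', p - 1))) ++ stack)
                (E.insert v p) := by
  rw [psRunStack.eq_def]

-- getD-with-[]-view is unchanged by setdefault _ []
theorem psGetD_setdefault_nil (d : PySem.Dict String (List String)) (x k : String) :
    ((d.setdefault x []).getD k []) = d.getD k [] := by
  by_cases hk : k = x
  · subst hk
    exact PySem.Dict.getD_setdefault_self (d := d) (k := k) (v := []) (d0 := [])
  · rw [PySem.Dict.getD_eq_get?_getD, PySem.Dict.get?_setdefault_of_ne (d := d) (v := []) hk,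
      ← PySem.Dict.getD_eq_get?_getD]

-- one network edge-pair step preserves equality of adjacency views
theorem psAddEdge_view (plants : PySem.Dict String Int)
    (d₁ d₂ : PySem.Dict String (List String)) (a b : String)
    (h : ∀ k, d₁.getD k [] = d₂.getD k []) :
    ∀ k, (psAddEdge plants d₁ a b).getD k [] = (psbAddEdge plants d₂ a b).getD k [] := by
  intro k
  unfold psAddEdge psbAddEdge
  by_cases hb : plants.contains b
  · simp [hb, h k]
  · simp only [hb, if_neg, Bool.false_eq_true, not_false_iff]
    rw [PySem.Dict.getD_modify, PySem.Dict.getD_modify]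
    by_cases hk : k = a
    · simp [hk, psGetD_setdefault_nil, h a]
    · simp [hk, psGetD_setdefault_nil, h k]

-- the two graph builds have the same adjacency view
theorem psView_build (plants : PySem.Dict String Int) :
    ∀ (network : List (String × String)) (d₁ d₂ : PySem.Dict String (List String)),
      (∀ k, d₁.getD k [] = d₂.getD k []) →
      ∀ k,
        (network.foldl (fun nodes link => psAddEdge plants (psAddEdge plants nodes link.1 link.2) link.2 link.1) d₁).getD k []
          = (network.foldl (fun adj link => psbAddEdge plants (psbAddEdge plants adj link.1 link.2) link.2 link.1) d₂).getD k [] := by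
  intro network
  induction network with
  | nil => intro d₁ d₂ h k; exact h k
  | cons ab rest IH =>
    intro d₁ d₂ h k
    exact IH _ _ (psAddEdge_view plants _ _ ab.2 ab.1 (psAddEdge_view plants d₁ d₂ ab.1 ab.2 h)) k

-- psBuildRoute only reads the adjacency through getD _ []
theorem psBuildRoute_congr (adj₁ adj₂ : PySem.Dict String (List String))
    (h : ∀ k, adj₁.getD k [] = adj₂.getD k []) :
    ∀ f c E p, psBuildRoute adj₁ f c E p = psBuildRoute adj₂ f c E p := by
  intro f
  induction f with
  | zero => intro c E p; rfl
  | succ f IH =>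
    intro c E p
    simp only [psBuildRoute, h c]
    by_cases hp : p = 0
    · simp [hp]
    · simp only [hp, if_neg, not_false_iff]
      apply PySem.List.foldl_congr_mem
      intro acc x _
      by_cases hs : acc.contains x && decide (acc.getD x 0 ≥ p)
      · simp [hs]
      · simp [hs, IH]

-- defunctionalization: running mapped frames = folding A's DFS step over the links
theorem psSim (adj : PySem.Dict String (List String)) :
    ∀ (f : Nat) (links : List String) (p : Int) (stack : List (String × Nat × Int))
      (E : PySem.Dict String Int),
      psRunStack adj ((links.map (fun x => (x, f, p))) ++ stack) E
        = psRunStack adj stack (links.foldl (psStep adj f p) E) := by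
  intro f
  induction f with
  | zero =>
    intro links
    induction links with
    | nil => intro p stack E; simp
    | cons l rest IH =>
      intro p stack E
      simp only [List.map_cons, List.cons_append, psRunStack_cons, List.foldl_cons]
      by_cases hs : E.contains l && decide (E.getD l 0 ≥ p)
      · simp only [hs, if_pos, IH, psStep]
      · simp only [hs, if_neg, Bool.false_eq_true, not_false_iff, IH, psStep, psBuildRoute]
  | succ f' IHf =>
    intro links
    induction links with
    | nil => intro p stack E; simp
    | cons l rest IH =>
      intro p stack E
      simp only [List.map_cons, List.cons_append, psRunStack_cons, List.foldl_cons]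
      by_cases hs : (E.contains l && decide (E.getD l 0 ≥ p)) = true
      · rw [if_pos hs, IH]
        have : psStep adj (f' + 1) p E l = E := by simp [psStep, hs]
        rw [this]
      · rw [if_neg hs]
        have hstep : psStep adj (f' + 1) p E l
            = psBuildRoute adj (f' + 1) l (E.insert l p) (p - 1) := by simp [psStep, hs]
        by_cases hp : p = 1
        · rw [if_pos hp, IH, hstep, psBuildRoute_succ, if_pos (show p - 1 = 0 by omega)]
        · rw [if_neg hp, IHf, IH, hstep, psBuildRoute_succ,
            if_neg (show ¬ (p - 1 = 0) by omega)]

-- A's per-plant loop and B's per-plant loop compute the same enabled dict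
theorem psOuter (adjB : PySem.Dict String (List String)) (F L : Nat) (hF : F = L + 1) :
    ∀ (pps : List (String × Int)) (nodes : PySem.Dict String (List String))
      (E : PySem.Dict String Int),
      (∀ k, nodes.getD k [] = adjB.getD k []) →
      (pps.foldl
          (fun (st : PySem.Dict String (List String) × PySem.Dict String Int) pp =>
            let nodes' := st.1.setdefault pp.1 []
            (nodes', psBuildRoute nodes' F pp.1 st.2 pp.2))
          (nodes, E)).2
        = pps.foldl
            (fun E pp =>
              if pp.2 = 0 then E
              else psRunStack adjB ((adjB.getD pp.1 []).map (fun x => (x, L, pp.2))) E)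
            E := by
  subst hF
  intro pps
  induction pps with
  | nil => intro nodes E h; rfl
  | cons pp rest IH =>
    intro nodes E h
    simp only [List.foldl_cons]
    have hview : ∀ k, (nodes.setdefault pp.1 []).getD k [] = adjB.getD k [] := by
      intro k; rw [psGetD_setdefault_nil]; exact h k
    have hstep : psBuildRoute (nodes.setdefault pp.1 []) (L + 1) pp.1 E pp.2
        = (if pp.2 = 0 then E
           else psRunStack adjB ((adjB.getD pp.1 []).map (fun x => (x, L, pp.2))) E) := by
      rw [psBuildRoute_congr _ adjB hview, psBuildRoute_succ]
      by_cases hp : pp.2 = 0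
      · simp [hp]
      · simp only [hp, if_neg, not_false_iff]
        have := psSim adjB L (adjB.getD pp.1 []) pp.2 [] E
        rw [List.append_nil] at this
        rw [this, psRunStack_nil]
    rw [hstep]
    exact IH _ _ hview

-- the add of a Python set commutes with filtering
theorem psAdd_filter (q : String → Bool) (s : PySem.Set String) (x : String) :
    (PySem.Set.add s x).filter q
      = if q x then PySem.Set.add (s.filter q) x else s.filter q := by
  by_cases hx : x ∈ s
  · rw [PySem.Set.add_of_mem hx]
    by_cases hq : q x
    · rw [if_pos hq, PySem.Set.add_of_mem (List.mem_filter.mpr ⟨hx, hq⟩)]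
    · rw [if_neg hq]
  · rw [PySem.Set.add_of_not_mem hx, List.filter_append]
    by_cases hq : q x
    · rw [if_pos hq]
      have hx' : x ∉ s.filter q := fun hmem => hx (List.mem_of_mem_filter hmem)
      rw [PySem.Set.add_of_not_mem hx']
      simp [hq]
    · rw [if_neg hq]; simp [hq]
  
-- first-occurrence dedup commutes with filtering
theorem psOfList_filter (q : String → Bool) (l : List String) :
    PySem.Set.ofList (l.filter q) = (PySem.Set.ofList l).filter q := by
  induction l using List.reverseRecOn with
  | nil => rfl
  | append_singleton l x IH =>
    by_cases hq : q x
    · have h1 : (l ++ [x]).filter q = l.filter q ++ [x] := by simp [List.filter_append, hq]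
      rw [h1, PySem.Set.ofList_append_singleton, PySem.Set.ofList_append_singleton,
        psAdd_filter, if_pos hq, IH]
    · have h1 : (l ++ [x]).filter q = l.filter q := by simp [List.filter_append, hq]
      rw [h1, PySem.Set.ofList_append_singleton, psAdd_filter, if_neg hq, IH]

-- ===== VERDICT (by name: the statement is the Claim_ definition above) =====
theorem power_supply_spec : Claim_equal_power_supply := by
  unfold Claim_equal_power_supply
  intro network power_plants _dom
  unfold Spec_power_supply power_supply power_supply_alt
  have hF : 2 * network.length + 2 = (2 * network.length + 1) + 1 := by omega
  simp only [hF]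
  rw [psOuter (adjB := (network.foldl
        (fun adj link => psbAddEdge (PySem.Dict.ofList power_plants) (psbAddEdge (PySem.Dict.ofList power_plants) adj link.1 link.2) link.2 link.1)
        PySem.Dict.empty)) ((2 * network.length + 1) + 1) (2 * network.length + 1) rfl _ _ _
      (psView_build (PySem.Dict.ofList power_plants) network PySem.Dict.empty PySem.Dict.empty (fun _ => rfl))]
  -- final assembly: diff-of-dedup = dedup-of-filter
  generalize hE : (PySem.Dict.ofList power_plants).items.foldl _ PySem.Dict.empty = E
  generalize hm : network.flatMap (fun link => [link.1, link.2]) = m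
  simp only [PySem.Set.diff]
  rw [← psOfList_filter]
  congr 1
  rw [List.filter_filter]
  apply List.filter_congr
  intro x _
  simp [PySem.Dict.contains_eq_decide_mem_keys, Bool.and_comm]
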